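-- pv_equiv track=rewrite | github.com/MrBrantCode/unitest_baseline | mut_generate/mist_train_cf/cf_56522/solution.py | modify_input
-- ===== SOURCE A (Python) =====
-- def modify_input(input_line, target_letter, replacement_symbol, occurrence, exception_words):
--     """
--     Replaces every nth occurrence of target_letter in input_line with replacement_symbol,
--     excluding occurrences within words in exception_words, and returns the modified string.
--
--     Parameters:
--     input_line (str): The input string.
--     target_letter (str): The character to be replaced.
--     replacement_symbol (str): The character to replace with.
--     occurrence (int): The occurrence of target_letter to replace.
--     exception_words (list): A list of words where target_letter should not be replaced.
--
--     Returns: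
--     str: The modified string.
--     """
--     words = input_line.split(' ')
--     count = 0
--     new_words = []
--     for word in words:
--         new_word = ""
--         if word not in exception_words:
--             for letter in word:
--                 if letter == target_letter:
--                     count += 1
--                     if count % occurrence == 0:
--                         new_word += replacement_symbol
--                         continue
--                 new_word += letter
--         else:
--             new_word = word
--         new_words.append(new_word)
--     return ' '.join(new_words)
-- ===== SOURCE B (Python) =====
-- def modify_input(input_line, target_letter, replacement_symbol, occurrence, exception_words):
--     words = input_line.split(' ')
--     # pass 1: decide which positions to replace
--     positions = set()
--     count = 0
--     for wi, word in enumerate(words):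
--         if word not in exception_words:
--             for ci, letter in enumerate(word):
--                 if letter == target_letter:
--                     count += 1
--                     if count % occurrence == 0:
--                         positions.add((wi, ci))
--     # pass 2: apply the replacements
--     out = []
--     for wi, word in enumerate(words):
--         if word in exception_words:
--             out.append(word)
--         else:
--             out.append(''.join(replacement_symbol if (wi, ci) in positions else letter
--                                for ci, letter in enumerate(word)))
--     return ' '.join(out)
-- ===== Notes on version B (the rewrite author's own statement) =====
-- stated objective: alternative
-- what changed: B separates deciding from doing: a first pass over enumerate(words) collects the set of (word_index, char_index) positions whose target-letter count hits a multiple of occurrence, and a second pass rebuilds each word by substitution at those positions, replacing A's single inline accumulate-with-continue loop.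
import Mathlib
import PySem

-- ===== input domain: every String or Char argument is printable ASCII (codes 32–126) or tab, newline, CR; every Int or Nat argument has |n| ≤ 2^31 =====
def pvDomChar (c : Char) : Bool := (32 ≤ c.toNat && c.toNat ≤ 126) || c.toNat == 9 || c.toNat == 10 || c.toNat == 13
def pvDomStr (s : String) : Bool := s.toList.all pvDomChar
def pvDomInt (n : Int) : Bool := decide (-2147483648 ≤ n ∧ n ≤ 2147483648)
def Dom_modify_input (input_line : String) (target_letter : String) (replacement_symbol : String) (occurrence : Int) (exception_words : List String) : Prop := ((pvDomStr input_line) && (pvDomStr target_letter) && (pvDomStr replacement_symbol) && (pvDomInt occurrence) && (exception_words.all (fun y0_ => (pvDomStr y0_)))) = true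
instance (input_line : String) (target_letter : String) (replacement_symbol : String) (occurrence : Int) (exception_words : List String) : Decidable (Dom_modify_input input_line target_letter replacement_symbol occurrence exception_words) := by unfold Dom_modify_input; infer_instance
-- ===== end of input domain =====

-- B re-implements A with two separate passes (first decide the set of (word,char) positions to
-- replace, then rebuild the words) instead of A's single inline accumulate-with-continue loop;
-- objective: alternative decomposition, not faster.

-- ===== PORT A =====
-- inner loop body: 'for letter in word: if letter == target_letter: count += 1; if count % occurrence == 0: new_word += replacement_symbol; continue; new_word += letter'
def aInner (target repl : List Char) (occ : Int) (st : Int × List Char) (letter : Char) : Int × List Char :=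
  if [letter] = target then
    let c := st.1 + 1
    if PySem.Int.mod c occ = 0 then (c, st.2 ++ repl) else (c, st.2 ++ [letter])
  else (st.1, st.2 ++ [letter])

def aWord (target repl : List Char) (occ : Int) (w : List Char) (count : Int) : Int × List Char :=
  w.foldl (aInner target repl occ) (count, ([] : List Char))

-- outer loop body: 'if word not in exception_words: … else: new_word = word; new_words.append(new_word)'
def aStep (exc : List (List Char)) (target repl : List Char) (occ : Int)
    (st : Int × List (List Char)) (w : List Char) : Int × List (List Char) :=
  if ¬ exc.contains w then
    let r := aWord target repl occ w st.1
    (r.1, st.2 ++ [r.2])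
  else (st.1, st.2 ++ [w])

def modify_input (input_line : String) (target_letter : String) (replacement_symbol : String) (occurrence : Int) (exception_words : List String) : String :=
  let words := PySem.Chars.splitOn input_line.toList " ".toList
  let r := words.foldl (aStep (exception_words.map String.toList) target_letter.toList replacement_symbol.toList occurrence) (0, [])
  String.ofList (PySem.Chars.join [' '] r.2)

-- ===== PORT B =====
-- pass-1 inner body: on a target letter bump the counter and, every 'occurrence'th time, record (wi, ci)
def bMark (target : List Char) (occ : Int) (wi : Int)
    (st : Int × PySem.Set (Int × Int)) (q : Int × Char) : Int × PySem.Set (Int × Int) :=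
  if [q.2] = target then
    let c := st.1 + 1
    if PySem.Int.mod c occ = 0 then (c, PySem.Set.add st.2 (wi, q.1)) else (c, st.2)
  else st

def bPass1Word (target : List Char) (occ : Int) (wi : Int) (w : List Char)
    (st : Int × PySem.Set (Int × Int)) : Int × PySem.Set (Int × Int) :=
  (PySem.List.enumerate w 0).foldl (bMark target occ wi) st

def bPass1 (exc : List (List Char)) (target : List Char) (occ : Int)
    (ws : List (Int × List Char)) (st : Int × PySem.Set (Int × Int)) : Int × PySem.Set (Int × Int) :=
  ws.foldl (fun st p => if ¬ exc.contains p.2 then bPass1Word target occ p.1 p.2 st else st) st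

-- pass-2: rebuild one non-exception word, substituting at recorded positions
def bRebuild (repl : List Char) (S : PySem.Set (Int × Int)) (wi : Int) (w : List Char) : List Char :=
  PySem.Chars.join [] ((PySem.List.enumerate w 0).map (fun q => if S.contains (wi, q.1) then repl else [q.2]))

def bPass2 (exc : List (List Char)) (repl : List Char) (S : PySem.Set (Int × Int))
    (ws : List (Int × List Char)) : List (List Char) :=
  ws.map (fun p => if exc.contains p.2 then p.2 else bRebuild repl S p.1 p.2)

def modify_input_alt (input_line : String) (target_letter : String) (replacement_symbol : String) (occurrence : Int) (exception_words : List String) : String :=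
  let words := PySem.Chars.splitOn input_line.toList " ".toList
  let exc := exception_words.map String.toList
  let S := (bPass1 exc target_letter.toList occurrence (PySem.List.enumerate words 0) (0, PySem.Set.empty)).2
  String.ofList (PySem.Chars.join [' '] (bPass2 exc replacement_symbol.toList S (PySem.List.enumerate words 0)))

-- ===== PRECONDITION & SPEC =====
-- Pre_ excludes exactly the inputs where Python A raises ZeroDivisionError: occurrence == 0 while
-- some non-exception word contains target_letter (both A and B compute count % occurrence there).
def Pre_modify_input (input_line : String) (target_letter : String) (replacement_symbol : String) (occurrence : Int) (exception_words : List String) : Prop :=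
  occurrence ≠ 0 ∨
    ((PySem.Chars.splitOn input_line.toList " ".toList).all
      (fun w => (exception_words.map String.toList).contains w
                || !(w.any (fun c => [c] == target_letter.toList)))) = true
instance (input_line : String) (target_letter : String) (replacement_symbol : String) (occurrence : Int) (exception_words : List String) : Decidable (Pre_modify_input input_line target_letter replacement_symbol occurrence exception_words) := by unfold Pre_modify_input; infer_instance

def pvWitness_modify_input : String × String × String × Int × List String :=
  ("banana apple pad", "a", "*", 2, ["apple"])

def Spec_modify_input (input_line : String) (target_letter : String) (replacement_symbol : String) (occurrence : Int) (exception_words : List String) (out : String) : Prop := out = modify_input_alt input_line target_letter replacement_symbol occurrence exception_words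
instance (input_line : String) (target_letter : String) (replacement_symbol : String) (occurrence : Int) (exception_words : List String) (out : String) : Decidable (Spec_modify_input input_line target_letter replacement_symbol occurrence exception_words out) := by unfold Spec_modify_input; infer_instance

-- ===== CLAIM (what is proved, stated in full; the proofs are below) =====
def Claim_equal_modify_input : Prop := ∀ (input_line : String) (target_letter : String) (replacement_symbol : String) (occurrence : Int) (exception_words : List String), Dom_modify_input input_line target_letter replacement_symbol occurrence exception_words → Pre_modify_input input_line target_letter replacement_symbol occurrence exception_words → Spec_modify_input input_line target_letter replacement_symbol occurrence exception_words (modify_input input_line target_letter replacement_symbol occurrence exception_words)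

-- ===== LEMMAS AND PROOFS =====

theorem join_nil_cons (p : List Char) (rest : List (List Char)) :
    PySem.Chars.join [] (p :: rest) = p ++ PySem.Chars.join [] rest := by
  cases rest with
  | nil => simp [PySem.Chars.join_singleton, PySem.Chars.join_nil]
  | cons q r => rw [PySem.Chars.join_cons_cons]; simp

theorem inner_lemma (target repl : List Char) (occ : Int) (wi : Int) :
    ∀ (w : List Char) (j c : Int) (S2 : List (Int × Int)) (acc : List Char),
    (∀ p ∈ S2, p.1 ≠ wi ∨ p.2 < j) →
    (w.foldl (aInner target repl occ) (c, acc)).1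
        = ((PySem.List.enumerate w j).foldl (bMark target occ wi) (c, S2)).1 ∧
    (w.foldl (aInner target repl occ) (c, acc)).2
        = acc ++ PySem.Chars.join []
            ((PySem.List.enumerate w j).map
              (fun q => if (((PySem.List.enumerate w j).foldl (bMark target occ wi) (c, S2)).2).contains (wi, q.1) then repl else [q.2])) ∧
    (∀ p ∈ S2, p ∈ ((PySem.List.enumerate w j).foldl (bMark target occ wi) (c, S2)).2) ∧
    (∀ p ∈ ((PySem.List.enumerate w j).foldl (bMark target occ wi) (c, S2)).2,
        p ∈ S2 ∨ (p.1 = wi ∧ j ≤ p.2)) := by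
  intro w
  induction w with
  | nil =>
      intro j c S2 acc h
      simp [PySem.List.enumerate, PySem.Chars.join_nil]
      exact fun a b hab => Or.inl hab
  | cons ch w ih =>
      intro j c S2 acc h
      rw [PySem.List.enumerate_cons]
      simp only [List.foldl_cons, List.map_cons]
      by_cases hm : [ch] = target
      · by_cases hz : PySem.Int.mod (c + 1) occ = 0
        · have hstepA : aInner target repl occ (c, acc) ch = (c + 1, acc ++ repl) := by
            simp [aInner, hm, hz]
          have hstepB : bMark target occ wi (c, S2) (j, ch) = (c + 1, PySem.Set.add S2 (wi, j)) := by
            simp [bMark, hm, hz]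
          simp only [hstepA, hstepB]
          have h' : ∀ p ∈ PySem.Set.add S2 (wi, j), p.1 ≠ wi ∨ p.2 < j + 1 := by
            intro p hp
            rcases (PySem.Set.mem_add S2 (wi, j) p).1 hp with hp | hp
            · rcases h p hp with h1 | h1
              · exact Or.inl h1
              · exact Or.inr (by omega)
            · subst hp; exact Or.inr (by omega)
          obtain ⟨h1, h2, h3, h4⟩ := ih (j + 1) (c + 1) (PySem.Set.add S2 (wi, j)) (acc ++ repl) h'
          have hmem : ((PySem.List.enumerate w (j + 1)).foldl (bMark target occ wi)
              (c + 1, PySem.Set.add S2 (wi, j))).2.contains (wi, j) = true :=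
            List.contains_iff_mem.mpr (h3 (wi, j) ((PySem.Set.mem_add S2 (wi, j) (wi, j)).2 (Or.inr rfl)))
          refine ⟨h1, ?_, ?_, ?_⟩
          · rw [h2, join_nil_cons, if_pos hmem, List.append_assoc]
          · intro p hp
            exact h3 p ((PySem.Set.mem_add S2 (wi, j) p).2 (Or.inl hp))
          · intro p hp
            rcases h4 p hp with hp' | hp'
            · rcases (PySem.Set.mem_add S2 (wi, j) p).1 hp' with hq | hq
              · exact Or.inl hq
              · subst hq; exact Or.inr ⟨rfl, by omega⟩
            · exact Or.inr ⟨hp'.1, by omega⟩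
        · have hstepA : aInner target repl occ (c, acc) ch = (c + 1, acc ++ [ch]) := by
            simp [aInner, hm, hz]
          have hstepB : bMark target occ wi (c, S2) (j, ch) = (c + 1, S2) := by
            simp [bMark, hm, hz]
          simp only [hstepA, hstepB]
          obtain ⟨h1, h2, h3, h4⟩ := ih (j + 1) (c + 1) S2 (acc ++ [ch])
            (fun p hp => by rcases h p hp with h1 | h1; exact Or.inl h1; exact Or.inr (by omega))
          have hmem : (wi, j) ∉ ((PySem.List.enumerate w (j + 1)).foldl (bMark target occ wi)
              (c + 1, S2)).2 := by
            intro hc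
            rcases h4 _ hc with hc' | hc'
            · rcases h _ hc' with h1 | h1
              · exact h1 rfl
              · omega
            · omega
          have hcf : ((PySem.List.enumerate w (j + 1)).foldl (bMark target occ wi)
              (c + 1, S2)).2.contains (wi, j) = false :=
            Bool.eq_false_iff.mpr (fun hcon => hmem (List.contains_iff_mem.mp hcon))
          refine ⟨h1, ?_, h3, ?_⟩
          · rw [h2, join_nil_cons]
            simp only [hcf, Bool.false_eq_true, if_false, List.append_assoc]
          · intro p hp
            rcases h4 p hp with hp' | hp'
            · exact Or.inl hp'
            · exact Or.inr ⟨hp'.1, by omega⟩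
      · have hstepA : aInner target repl occ (c, acc) ch = (c, acc ++ [ch]) := by
          simp [aInner, hm]
        have hstepB : bMark target occ wi (c, S2) (j, ch) = (c, S2) := by
          simp [bMark, hm]
        simp only [hstepA, hstepB]
        obtain ⟨h1, h2, h3, h4⟩ := ih (j + 1) c S2 (acc ++ [ch])
          (fun p hp => by rcases h p hp with h1 | h1; exact Or.inl h1; exact Or.inr (by omega))
        have hmem : (wi, j) ∉ ((PySem.List.enumerate w (j + 1)).foldl (bMark target occ wi)
            (c, S2)).2 := by
          intro hc
          rcases h4 _ hc with hc' | hc'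
          · rcases h _ hc' with h1 | h1
            · exact h1 rfl
            · omega
          · omega
        have hcf : ((PySem.List.enumerate w (j + 1)).foldl (bMark target occ wi)
            (c, S2)).2.contains (wi, j) = false :=
          Bool.eq_false_iff.mpr (fun hcon => hmem (List.contains_iff_mem.mp hcon))
        refine ⟨h1, ?_, h3, ?_⟩
        · rw [h2, join_nil_cons]
          simp only [hcf, Bool.false_eq_true, if_false, List.append_assoc]
        · intro p hp
          rcases h4 p hp with hp' | hp'
          · exact Or.inl hp'
          · exact Or.inr ⟨hp'.1, by omega⟩

-- the word list: A's single loop agrees with B's pass1-then-pass2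
theorem outer_lemma (exc : List (List Char)) (target repl : List Char) (occ : Int) :
    ∀ (ws : List (List Char)) (s c : Int) (S : List (Int × Int)) (acc : List (List Char)),
    (∀ p ∈ S, p.1 < s) →
    (ws.foldl (aStep exc target repl occ) (c, acc)).1
        = (bPass1 exc target occ (PySem.List.enumerate ws s) (c, S)).1 ∧
    (ws.foldl (aStep exc target repl occ) (c, acc)).2
        = acc ++ bPass2 exc repl (bPass1 exc target occ (PySem.List.enumerate ws s) (c, S)).2 (PySem.List.enumerate ws s) ∧
    (∀ p ∈ S, p ∈ (bPass1 exc target occ (PySem.List.enumerate ws s) (c, S)).2) ∧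
    (∀ p ∈ (bPass1 exc target occ (PySem.List.enumerate ws s) (c, S)).2, p ∈ S ∨ s ≤ p.1) := by
  intro ws
  induction ws with
  | nil =>
      intro s c S acc h
      simp [bPass1, bPass2, PySem.List.enumerate]
      exact fun a b hab => Or.inl hab
  | cons w rest ih =>
      intro s c S acc h
      rw [PySem.List.enumerate_cons]
      unfold bPass1
      simp only [List.foldl_cons]
      by_cases he : exc.contains w
      · have hstepA : aStep exc target repl occ (c, acc) w = (c, acc ++ [w]) := by
          unfold aStep; rw [if_neg (fun hn => hn he)]
        have hstepB : (if ¬ exc.contains (s, w).2 = true then bPass1Word target occ (s, w).1 (s, w).2 (c, S) else (c, S)) = (c, S) := by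
          rw [if_neg (fun hn => hn he)]
        rw [hstepA, hstepB]
        obtain ⟨h1, h2, h3, h4⟩ := ih (s + 1) c S (acc ++ [w])
          (fun p hp => by have := h p hp; omega)
        rw [bPass1] at h1 h2 h3 h4
        refine ⟨h1, ?_, h3, ?_⟩
        · rw [h2]
          simp [bPass2, List.contains_iff_mem.mp he]
        · intro p hp
          rcases h4 p hp with hp' | hp'
          · exact Or.inl hp'
          · exact Or.inr (by omega)
      · have hstepA : aStep exc target repl occ (c, acc) w
            = ((aWord target repl occ w c).1, acc ++ [(aWord target repl occ w c).2]) := by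
          unfold aStep; rw [if_pos he]
        have hstepB : (if ¬ exc.contains (s, w).2 = true then bPass1Word target occ (s, w).1 (s, w).2 (c, S) else (c, S))
            = (PySem.List.enumerate w 0).foldl (bMark target occ s) (c, S) := by
          rw [if_pos he, bPass1Word]
        rw [hstepA, hstepB]
        obtain ⟨i1, i2, i3, i4⟩ := inner_lemma target repl occ s w 0 c S []
          (fun p hp => Or.inl (by have := h p hp; omega))
        have hS1 : ∀ p ∈ ((PySem.List.enumerate w 0).foldl (bMark target occ s) (c, S)).2, p.1 < s + 1 := by
          intro p hp
          rcases i4 p hp with hp' | hp'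
          · have := h p hp'; omega
          · omega
        obtain ⟨h1, h2, h3, h4⟩ := ih (s + 1)
          ((PySem.List.enumerate w 0).foldl (bMark target occ s) (c, S)).1
          ((PySem.List.enumerate w 0).foldl (bMark target occ s) (c, S)).2
          (acc ++ [(aWord target repl occ w c).2]) hS1
        rw [bPass1] at h1 h2 h3 h4
        simp only [Prod.mk.eta] at h1 h2 h3 h4
        have hc1 : (aWord target repl occ w c).1
            = ((PySem.List.enumerate w 0).foldl (bMark target occ s) (c, S)).1 := i1
        have hcont : ∀ x : Int,
            ((PySem.List.enumerate rest (s + 1)).foldl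
              (fun st p => if ¬ exc.contains p.2 = true then bPass1Word target occ p.1 p.2 st else st)
              ((PySem.List.enumerate w 0).foldl (bMark target occ s) (c, S))).2.contains (s, x)
            = ((PySem.List.enumerate w 0).foldl (bMark target occ s) (c, S)).2.contains (s, x) := by
          intro x
          by_cases hx : (s, x) ∈ ((PySem.List.enumerate w 0).foldl (bMark target occ s) (c, S)).2
          · rw [(PySem.Set.contains_iff _ _).mpr (h3 _ hx), (PySem.Set.contains_iff _ _).mpr hx]
          · have t2 : PySem.Set.contains ((PySem.List.enumerate w 0).foldl (bMark target occ s) (c, S)).2 (s, x) = false :=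
              Bool.eq_false_iff.mpr (fun hcon => hx ((PySem.Set.contains_iff _ _).mp hcon))
            have t1 : ((PySem.List.enumerate rest (s + 1)).foldl
                (fun st p => if ¬ exc.contains p.2 = true then bPass1Word target occ p.1 p.2 st else st)
                ((PySem.List.enumerate w 0).foldl (bMark target occ s) (c, S))).2.contains (s, x) = false := by
              refine Bool.eq_false_iff.mpr (fun hcon => ?_)
              rcases h4 _ ((PySem.Set.contains_iff _ _).mp hcon) with hm | hm
              · exact hx hm
              · have : s + 1 ≤ s := by simpa using hm
                omega
            rw [t1, t2]
        have hword : (aWord target repl occ w c).2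
            = bRebuild repl
                ((PySem.List.enumerate rest (s + 1)).foldl
                  (fun st p => if ¬ exc.contains p.2 = true then bPass1Word target occ p.1 p.2 st else st)
                  ((PySem.List.enumerate w 0).foldl (bMark target occ s) (c, S))).2 s w := by
          unfold aWord
          rw [i2, List.nil_append, bRebuild]
          congr 1
          apply List.map_congr_left
          intro q _
          rw [hcont q.1]
        refine ⟨?_, ?_, fun p hp => h3 p (i3 p hp), ?_⟩
        · rw [hc1]; exact h1
        · have he' : w ∉ exc := fun hm => he (List.contains_iff_mem.mpr hm)
          rw [hc1, h2, hword]
          simp [bPass2, he']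
        · intro p hp
          rcases h4 p hp with hp' | hp'
          · rcases i4 p hp' with hq | hq
            · exact Or.inl hq
            · exact Or.inr (by omega)
          · exact Or.inr (by omega)

-- ===== VERDICT (by name: the statement is the Claim_ definition above) =====
theorem modify_input_spec : Claim_equal_modify_input := by
  intro input_line target_letter replacement_symbol occurrence exception_words _ _
  unfold Spec_modify_input modify_input modify_input_alt
  have h := outer_lemma (exception_words.map String.toList) target_letter.toList
      replacement_symbol.toList occurrence
      (PySem.Chars.splitOn input_line.toList " ".toList) 0 0 [] [] (by intro p hp; cases hp)
  simp only [PySem.Set.empty] at *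
  rw [h.2.1]
  rfl
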